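-- pv_equiv track=rewrite | github.com/rscarmo/Quantum-DCMST | qubo_problem.py | generate_states_excluding_specific
-- ===== SOURCE A (Python) =====
-- from itertools import product
--
-- def generate_states_excluding_specific(n_qubits, exclude_state):
--     """
--     Gera todos os estados possíveis para n_qubits, excluindo um estado específico.
--
--     Parâmetros:
--     n_qubits (int): Número de qubits.
--     exclude_state (str): O estado binário a ser excluído (e.g., '000').
--
--     Retorna:
--     List[str]: Lista de estados possíveis em formato binário, exceto o estado excluído.
--     """
--     # Gera todos os estados binários possíveis
--     all_states = product([0, 1], repeat=n_qubits)
--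
--     # Exclui o estado especificado
--     valid_states = [
--         "".join(map(str, state))
--         for state in all_states
--         if "".join(map(str, state)) != exclude_state
--     ]
--
--     return valid_states
-- ===== SOURCE B (Python) =====
-- def generate_states_excluding_specific(n_qubits, exclude_state):
--     """Recursive divide-and-conquer on the leading bit: all n-bit strings are
--     the '0'-prefixed block followed by the '1'-prefixed block of the (n-1)-bit
--     strings, which is exactly lexicographic order; then filter the excluded one."""
--     def gen(n):
--         if n == 0:
--             return ['']
--         rest = gen(n - 1)
--         return ['0' + s for s in rest] + ['1' + s for s in rest]
--     return [s for s in gen(n_qubits) if s != exclude_state]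
-- ===== Notes on version B (the rewrite author's own statement) =====
-- stated objective: alternative
-- what changed: Replaces the itertools.product enumeration (iteratively extending every suffix by a trailing bit) with a recursive divide-and-conquer on the leading bit: the n-bit strings are the '0'-prefixed block followed by the '1'-prefixed block of the (n-1)-bit strings, then a single filter drops the excluded state.
import Mathlib
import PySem

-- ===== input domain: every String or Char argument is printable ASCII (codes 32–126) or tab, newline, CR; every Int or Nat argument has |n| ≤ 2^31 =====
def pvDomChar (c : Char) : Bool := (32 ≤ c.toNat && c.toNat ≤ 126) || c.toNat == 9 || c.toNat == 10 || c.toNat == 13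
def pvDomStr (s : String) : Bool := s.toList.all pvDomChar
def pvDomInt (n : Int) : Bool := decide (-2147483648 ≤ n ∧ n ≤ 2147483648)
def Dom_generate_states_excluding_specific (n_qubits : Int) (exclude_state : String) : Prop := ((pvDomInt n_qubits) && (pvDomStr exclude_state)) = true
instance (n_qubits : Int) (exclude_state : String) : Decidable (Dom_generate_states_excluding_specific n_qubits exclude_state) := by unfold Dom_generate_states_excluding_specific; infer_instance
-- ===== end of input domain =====

-- B replaces the itertools.product trailing-bit extension loop by a recursion on the leading bit; same output, same cost (objective: alternative).

-- ===== PORT A =====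
-- product([0,1], repeat=n): start from [()] and, n times, extend every tuple by a trailing 0 then 1
def pyProdA (n : Nat) : List (List Int) :=
  (List.range n).foldl (fun acc _ => acc.flatMap (fun st => [st ++ [0], st ++ [1]])) [[]]

-- "".join(map(str, state))
def pyJoinBits (st : List Int) : String :=
  PySem.Str.join "" (st.map PySem.Int.toStr)

def generate_states_excluding_specific (n_qubits : Int) (exclude_state : String) : List String :=
  (pyProdA n_qubits.toNat).filterMap
    (fun st => if pyJoinBits st != exclude_state then some (pyJoinBits st) else none)

-- ===== PORT B =====
-- gen(n): '0'-prefixed block of gen(n-1) followed by the '1'-prefixed block (strings built as List Char, '0'+s = cons)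
def genStates : Nat → List (List Char)
  | 0 => [[]]
  | n + 1 =>
      let rest := genStates n
      rest.map (fun s => '0' :: s) ++ rest.map (fun s => '1' :: s)

def generate_states_excluding_specific_alt (n_qubits : Int) (exclude_state : String) : List String :=
  ((genStates n_qubits.toNat).map String.ofList).filter (fun s => s != exclude_state)

-- ===== PRECONDITION & SPEC =====
-- Pre_ excludes negative n_qubits, on which A raises ValueError (product with negative repeat).
def Pre_generate_states_excluding_specific (n_qubits : Int) (exclude_state : String) : Prop :=
  0 ≤ n_qubits
instance (n_qubits : Int) (exclude_state : String) : Decidable (Pre_generate_states_excluding_specific n_qubits exclude_state) := by unfold Pre_generate_states_excluding_specific; infer_instance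

def pvWitness_generate_states_excluding_specific : Int × String := (2, "01")

def Spec_generate_states_excluding_specific (n_qubits : Int) (exclude_state : String) (out : List String) : Prop := out = generate_states_excluding_specific_alt n_qubits exclude_state
instance (n_qubits : Int) (exclude_state : String) (out : List String) : Decidable (Spec_generate_states_excluding_specific n_qubits exclude_state out) := by unfold Spec_generate_states_excluding_specific; infer_instance

-- ===== CLAIM (what is proved, stated in full; the proofs are below) =====
def Claim_equal_generate_states_excluding_specific : Prop := ∀ (n_qubits : Int) (exclude_state : String), Dom_generate_states_excluding_specific n_qubits exclude_state → Pre_generate_states_excluding_specific n_qubits exclude_state → Spec_generate_states_excluding_specific n_qubits exclude_state (generate_states_excluding_specific n_qubits exclude_state)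

-- ===== LEMMAS AND PROOFS =====

-- pyProdA satisfies the trailing-bit recurrence
theorem pyProdA_succ (n : Nat) :
    pyProdA (n + 1) = (pyProdA n).flatMap (fun st => [st ++ [0], st ++ [1]]) := by
  simp [pyProdA, List.range_succ]

-- "".join with empty separator is concatenation
theorem joinNil_flatten (parts : List (List Char)) :
    PySem.Chars.join [] parts = parts.flatten := by
  induction parts with
  | nil => simp [PySem.Chars.join_nil]
  | cons p rest ih =>
      cases rest with
      | nil => simp [PySem.Chars.join_singleton]
      | cons q r => simp [PySem.Chars.join_cons_cons, ih]

theorem pyJoinBits_toList (st : List Int) :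
    (pyJoinBits st).toList = (st.map (fun b => (PySem.Int.toStr b).toList)).flatten := by
  simp [pyJoinBits, PySem.Str.toList_join, joinNil_flatten, List.map_map, Function.comp_def]

theorem toChars_zero : PySem.Int.toChars 0 = ['0'] := by decide
theorem toChars_one : PySem.Int.toChars 1 = ['1'] := by decide

-- joining bit digits turns a trailing Int bit into a trailing Char digit
theorem pyJoinBits_toList_append (st : List Int) (b : Int) :
    (pyJoinBits (st ++ [b])).toList = (pyJoinBits st).toList ++ (PySem.Int.toStr b).toList := by
  simp [pyJoinBits_toList]

-- prefixing a fixed char commutes with extending by a trailing digit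
theorem flatMap_map_cons (c : Char) (l : List (List Char)) :
    (l.map (fun s => c :: s)).flatMap (fun cs => [cs ++ ['0'], cs ++ ['1']])
      = (l.flatMap (fun cs => [cs ++ ['0'], cs ++ ['1']])).map (fun s => c :: s) := by
  induction l with
  | nil => rfl
  | cons a t ih => simp_all

-- genStates satisfies the SAME trailing-bit recurrence (key bridge between the two algorithms)
theorem genStates_succ_last (n : Nat) :
    genStates (n + 1) = (genStates n).flatMap (fun cs => [cs ++ ['0'], cs ++ ['1']]) := by
  induction n with
  | zero => rfl
  | succ n ih =>
      have h2 : genStates (n + 2)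
          = (genStates (n + 1)).map (fun s => '0' :: s) ++ (genStates (n + 1)).map (fun s => '1' :: s) := rfl
      rw [h2, ih, ← flatMap_map_cons, ← flatMap_map_cons, ← List.flatMap_append, ← ih]
      rfl

-- the char lists produced by A's enumeration are exactly genStates
theorem map_join_pyProdA (n : Nat) :
    (pyProdA n).map (fun st => (pyJoinBits st).toList) = genStates n := by
  induction n with
  | zero => simp [pyProdA, genStates, pyJoinBits_toList]
  | succ n ih =>
      rw [pyProdA_succ, genStates_succ_last, ← ih]
      simp [List.map_flatMap, List.flatMap_map,
            pyJoinBits_toList_append, toChars_zero, toChars_one]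

theorem map_join_pyProdA' (n : Nat) :
    (pyProdA n).map pyJoinBits = (genStates n).map String.ofList := by
  rw [← map_join_pyProdA, List.map_map]
  exact (List.map_congr_left (fun st _ => by simp)).symm

-- the comprehension computing the join twice is map-then-filter
theorem filterMap_if_eq (l : List (List Int)) (ex : String) :
    l.filterMap (fun st => if pyJoinBits st != ex then some (pyJoinBits st) else none)
      = (l.map pyJoinBits).filter (fun s => s != ex) := by
  induction l with
  | nil => rfl
  | cons a t ih =>
      by_cases h : pyJoinBits a = ex
      · simpa [List.filterMap_cons, List.filter_cons, h] using ih
      · simpa [List.filterMap_cons, List.filter_cons, h] using ih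

-- ===== VERDICT (by name: the statement is the Claim_ definition above) =====
theorem generate_states_excluding_specific_spec : Claim_equal_generate_states_excluding_specific := by
  intro n ex _ _
  unfold Spec_generate_states_excluding_specific
  unfold generate_states_excluding_specific generate_states_excluding_specific_alt
  rw [filterMap_if_eq, map_join_pyProdA']
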